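-- pv_equiv track=rewrite | github.com/stanfordnlp/dspy | test_before_pypi/lib/python3.9/site-packages/litellm/utils.py | _get_order_filtered_deployments
-- ===== SOURCE A (Python) =====
-- from typing import (
--     TYPE_CHECKING,
--     Any,
--     Callable,
--     Dict,
--     Iterable,
--     List,
--     Literal,
--     Optional,
--     Tuple,
--     Type,
--     Union,
--     cast,
--     get_args,
-- )
--
-- def _get_order_filtered_deployments(healthy_deployments: List[Dict]) -> List:
--     min_order = min(
--         (
--             deployment["litellm_params"]["order"]
--             for deployment in healthy_deployments
--             if "order" in deployment["litellm_params"]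
--         ),
--         default=None,
--     )
--
--     if min_order is not None:
--         filtered_deployments = [
--             deployment
--             for deployment in healthy_deployments
--             if deployment["litellm_params"].get("order") == min_order
--         ]
--
--         return filtered_deployments
--     return healthy_deployments
-- ===== SOURCE B (Python) =====
-- def _get_order_filtered_deployments(healthy_deployments):
--     min_order = None
--     result = []
--     for deployment in healthy_deployments:
--         params = deployment["litellm_params"]
--         if "order" not in params:
--             continue
--         o = params["order"]
--         if min_order is None or o < min_order:
--             min_order = o
--             result = [deployment]
--         elif o == min_order:
--             result.append(deployment)
--     if min_order is None:
--         return healthy_deployments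
--     return result
-- ===== Notes on version B (the rewrite author's own statement) =====
-- stated objective: alternative
-- what changed: Replaces A's two passes (min over a generator, then a full filter) by a single pass that maintains a running minimum order and the list of deployments achieving it, resetting the list on a strict improvement and appending on ties.
import Mathlib
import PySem

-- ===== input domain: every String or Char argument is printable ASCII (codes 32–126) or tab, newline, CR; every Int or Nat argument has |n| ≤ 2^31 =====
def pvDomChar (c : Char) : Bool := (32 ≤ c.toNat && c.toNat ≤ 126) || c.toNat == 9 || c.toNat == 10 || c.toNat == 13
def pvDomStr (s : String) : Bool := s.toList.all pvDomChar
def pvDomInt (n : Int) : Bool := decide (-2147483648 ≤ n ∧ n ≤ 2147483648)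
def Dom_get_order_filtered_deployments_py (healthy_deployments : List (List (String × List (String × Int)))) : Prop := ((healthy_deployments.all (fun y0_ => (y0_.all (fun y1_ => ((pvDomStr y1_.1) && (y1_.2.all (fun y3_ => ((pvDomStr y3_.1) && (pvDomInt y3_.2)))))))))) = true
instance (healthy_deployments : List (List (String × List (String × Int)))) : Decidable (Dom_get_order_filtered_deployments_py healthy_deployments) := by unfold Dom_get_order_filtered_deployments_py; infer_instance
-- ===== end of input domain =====

-- B fuses A's two passes (min over orders, then filter) into one pass keeping a running minimum and its candidate list.


-- dict lookup on an association list: first match (shared dict primitive of both ports)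
def pvAget {α : Type} (d : List (String × α)) (k : String) : Option α :=
  (d.find? (fun p => p.1 == k)).map (·.2)

-- deployment["litellm_params"]; the KeyError case (key absent) is excluded by Pre_, where getD's default is never reached
def pvLp (dep : List (String × List (String × Int))) : List (String × Int) :=
  (pvAget dep "litellm_params").getD []

-- ===== PORT A =====
def get_order_filtered_deployments_py (healthy_deployments : List (List (String × List (String × Int)))) : List (List (String × List (String × Int))) :=
  -- min((d["litellm_params"]["order"] for d in hd if "order" in d["litellm_params"]), default=None)
  let orders := healthy_deployments.filterMap (fun dep => pvAget (pvLp dep) "order")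
  match PySem.List.min? orders (fun x => x) with
  | none => healthy_deployments
  | some m =>
    -- [d for d in hd if d["litellm_params"].get("order") == min_order]
    healthy_deployments.filter (fun dep => pvAget (pvLp dep) "order" == some m)

-- ===== PORT B =====
-- one step of B's single pass: running minimum (none = unset) and current candidate list
def pvStep (st : Option Int × List (List (String × List (String × Int))))
    (dep : List (String × List (String × Int))) :
    Option Int × List (List (String × List (String × Int))) :=
  match pvAget (pvLp dep) "order" with
  | none => st
  | some o =>
    match st.1 with
    | none => (some o, [dep])
    | some m =>
      if o < m then (some o, [dep])
      else if o == m then (st.1, st.2 ++ [dep])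
      else st

def get_order_filtered_deployments_py_alt (healthy_deployments : List (List (String × List (String × Int)))) : List (List (String × List (String × Int))) :=
  let st := healthy_deployments.foldl pvStep (none, [])
  match st.1 with
  | none => healthy_deployments
  | some _ => st.2

-- ===== PRECONDITION & SPEC =====
-- Pre_ excludes exactly the inputs where Python A raises KeyError: a deployment without the "litellm_params" key (B raises there too).
def Pre_get_order_filtered_deployments_py (healthy_deployments : List (List (String × List (String × Int)))) : Prop :=
  healthy_deployments.all (fun dep => (dep.find? (fun p => p.1 == "litellm_params")).isSome) = true
instance (healthy_deployments : List (List (String × List (String × Int)))) : Decidable (Pre_get_order_filtered_deployments_py healthy_deployments) := by unfold Pre_get_order_filtered_deployments_py; infer_instance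

def pvWitness_get_order_filtered_deployments_py : (List (List (String × List (String × Int)))) :=
  [[("litellm_params", [("order", 1)])], [("litellm_params", [])]]

def Spec_get_order_filtered_deployments_py (healthy_deployments : List (List (String × List (String × Int)))) (out : List (List (String × List (String × Int)))) : Prop := out = get_order_filtered_deployments_py_alt healthy_deployments
instance (healthy_deployments : List (List (String × List (String × Int)))) (out : List (List (String × List (String × Int)))) : Decidable (Spec_get_order_filtered_deployments_py healthy_deployments out) := by unfold Spec_get_order_filtered_deployments_py; infer_instance

-- ===== CLAIM (what is proved, stated in full; the proofs are below) =====
def Claim_equal_get_order_filtered_deployments_py : Prop := ∀ (healthy_deployments : List (List (String × List (String × Int)))), Dom_get_order_filtered_deployments_py healthy_deployments → Pre_get_order_filtered_deployments_py healthy_deployments → Spec_get_order_filtered_deployments_py healthy_deployments (get_order_filtered_deployments_py healthy_deployments)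

-- ===== LEMMAS AND PROOFS =====

-- abbreviations used only by the proofs
def pvOrd (dep : List (String × List (String × Int))) : Option Int := pvAget (pvLp dep) "order"
def pvFilt (l : List (List (String × List (String × Int)))) (v : Int) : List (List (String × List (String × Int))) :=
  l.filter (fun dep => pvOrd dep == some v)
def pvOminStep (acc : Option Int) (o : Int) : Option Int :=
  match acc with | none => some o | some m => some (min m o)
def pvOmin (l : List Int) : Option Int := l.foldl pvOminStep none

lemma pvOmin_foldl_some (l : List Int) (m : Int) :
    l.foldl pvOminStep (some m) = some (l.foldl min m) := by
  induction l generalizing m with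
  | nil => rfl
  | cons x t ih => simp [List.foldl, pvOminStep, ih]

lemma pvMin?_eq_omin (l : List Int) :
    PySem.List.min? l (fun x => x) = pvOmin l := by
  cases l with
  | nil => rfl
  | cons x t =>
    rw [PySem.List.min?_id_cons, pvOmin, List.foldl, pvOminStep, pvOmin_foldl_some]

lemma pvFoldlMin_le_init (t : List Int) (y : Int) : t.foldl min y ≤ y := by
  induction t generalizing y with
  | nil => simp
  | cons z s ih => exact le_trans (ih (min y z)) (min_le_left _ _)

lemma pvFoldlMin_le_mem (t : List Int) : ∀ (y : Int), ∀ x ∈ t, t.foldl min y ≤ x := by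
  induction t with
  | nil => intro y x hx; simp at hx
  | cons z s ih =>
    intro y x hx
    rcases List.mem_cons.mp hx with hx | hx
    · subst hx
      exact le_trans (pvFoldlMin_le_init s (min y x)) (min_le_right _ _)
    · exact ih (min y z) x hx

lemma pvOmin_le (l : List Int) (k : Int) (h : pvOmin l = some k) : ∀ x ∈ l, k ≤ x := by
  intro x hx
  cases l with
  | nil => simp at hx
  | cons y t =>
    rw [pvOmin, List.foldl, pvOminStep, pvOmin_foldl_some] at h
    have hk : k = t.foldl min y := by
      have := Option.some.inj h
      omega
    subst hk
    rcases List.mem_cons.mp hx with hx | hx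
    · subst hx; exact pvFoldlMin_le_init t x
    · exact pvFoldlMin_le_mem t y x hx

lemma pvFilt_nil (t : List (List (String × List (String × Int)))) (v : Int)
    (h : ∀ x ∈ t.filterMap pvOrd, v < x) : pvFilt t v = [] := by
  induction t with
  | nil => rfl
  | cons dep r ih =>
    cases ho : pvOrd dep with
    | none =>
      have : pvFilt (dep :: r) v = pvFilt r v := by
        try simp [pvFilt, List.filter, ho]
      rw [this]
      exact ih (fun x hx => h x (by simp [List.filterMap, ho]; exact (by simpa [ho] using hx)))
    | some o =>
      have hmem : o ∈ (dep :: r).filterMap pvOrd := by simp [List.filterMap_cons, ho]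
      have hvo : v < o := h o hmem
      have hne : (pvOrd dep == some v) = false := by
        try simp [ho]
        omega
      have : pvFilt (dep :: r) v = pvFilt r v := by
        try simp [pvFilt, List.filter, hne]
      rw [this]
      exact ih (fun x hx => h x (by simp [List.filterMap_cons, ho]; right; simpa using hx))

lemma pvFoldlMin_pull (r : List Int) : ∀ a b : Int, r.foldl min (min a b) = min a (r.foldl min b) := by
  induction r with
  | nil => intro a b; rfl
  | cons z u ih =>
    intro a b
    show u.foldl min (min (min a b) z) = min a (u.foldl min (min b z))
    rw [min_assoc, ih]

lemma pvOmin_cons (o : Int) (s : List Int) :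
    pvOmin (o :: s) = some (match pvOmin s with | none => o | some k => min o k) := by
  cases s with
  | nil => rfl
  | cons y r =>
    show pvOmin (o :: y :: r) = some (match pvOmin (y :: r) with | none => o | some k => min o k)
    rw [pvOmin, List.foldl, List.foldl, pvOmin, List.foldl]
    show r.foldl pvOminStep (pvOminStep (pvOminStep none o) y) =
      some (match r.foldl pvOminStep (pvOminStep none y) with | none => o | some k => min o k)
    simp only [pvOminStep, pvOmin_foldl_some, pvFoldlMin_pull]

lemma pvFilt_nil_none (t : List (List (String × List (String × Int)))) (v : Int)
    (hK : pvOmin (t.filterMap pvOrd) = none) : pvFilt t v = [] := by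
  apply pvFilt_nil
  intro x hx
  cases hs : t.filterMap pvOrd with
  | nil => rw [hs] at hx; simp at hx
  | cons y r => rw [hs, pvOmin_cons] at hK; simp at hK

lemma pvFilt_nil_lt (t : List (List (String × List (String × Int)))) (k v : Int)
    (hK : pvOmin (t.filterMap pvOrd) = some k) (h : v < k) : pvFilt t v = [] := by
  apply pvFilt_nil
  intro x hx
  exact lt_of_lt_of_le h (pvOmin_le _ _ hK x hx)

lemma pvLoop_some (l : List (List (String × List (String × Int)))) (m : Int)
    (res : List (List (String × List (String × Int)))) :
    l.foldl pvStep (some m, res) =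
      match pvOmin (l.filterMap pvOrd) with
      | none => (some m, res)
      | some k =>
        if k < m then (some k, pvFilt l k)
        else if k = m then (some m, res ++ pvFilt l m)
        else (some m, res) := by
  induction l generalizing m res with
  | nil => rfl
  | cons dep t ih =>
    cases ho : pvAget (pvLp dep) "order" with
    | none =>
      have hord : pvOrd dep = none := ho
      have hstep : pvStep (some m, res) dep = (some m, res) := by simp [pvStep, ho]
      have hfm : (dep :: t).filterMap pvOrd = t.filterMap pvOrd := by
        try simp [hord]
      have hfk : ∀ v, pvFilt (dep :: t) v = pvFilt t v := by
        intro v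
        have hc : (pvOrd dep == some v) = false := by simp [hord]
        try simp [pvFilt, hc]
      rw [List.foldl_cons, hstep, ih, hfm]
      cases hK : pvOmin (t.filterMap pvOrd) with
      | none => rfl
      | some k => simp only [hfk]
    | some o =>
      have hord : pvOrd dep = some o := ho
      have hstep : pvStep (some m, res) dep =
          (if o < m then (some o, [dep])
           else if o == m then (some m, res ++ [dep]) else (some m, res)) := by
        try simp [pvStep, ho]
      have hfm : (dep :: t).filterMap pvOrd = o :: t.filterMap pvOrd := by
        try simp [hord]
      have hfe : pvFilt (dep :: t) o = dep :: pvFilt t o := by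
        have hc : (pvOrd dep == some o) = true := by simp [hord]
        try simp [pvFilt, hc]
      have hfn : ∀ v, o ≠ v → pvFilt (dep :: t) v = pvFilt t v := by
        intro v hv
        have hc : (pvOrd dep == some v) = false := by simp [hord]; exact hv
        try simp [pvFilt, hc]
      rw [List.foldl_cons, hstep, hfm, pvOmin_cons]
      cases hK : pvOmin (t.filterMap pvOrd) with
      | none =>
        have hnil : ∀ v, pvFilt t v = [] := fun v => pvFilt_nil_none t v hK
        try dsimp only
        by_cases h1 : o < m
        · simp only [if_pos h1, ih, hK]
          try dsimp only
          try simp [h1, hfe, hnil]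
        · by_cases h2 : o = m
          · simp only [if_neg h1, beq_iff_eq, if_pos h2, ih, hK]
            try dsimp only
            have hfem : pvFilt (dep :: t) m = dep :: pvFilt t m := by
              rw [← h2]; exact hfe
            try simp [h1, h2, hfem, hnil]
          · simp only [if_neg h1, beq_iff_eq, if_neg h2, ih, hK]
            try dsimp only
            try simp [h1, h2]
      | some k =>
        try dsimp only
        by_cases h1 : o < m
        · simp only [if_pos h1, ih, hK]
          try dsimp only
          rcases lt_trichotomy k o with hk1 | hk2 | hk3
          · have hmin : min o k = k := min_eq_right (le_of_lt hk1)
            rw [hmin]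
            try simp [hk1, show k < m by omega, hfn k (by omega)]
          · have hmin : min o k = k := by rw [hk2, min_self]
            rw [hmin, hk2]
            try simp [h1, hfe, lt_irrefl]
          · have hmin : min o k = o := min_eq_left (le_of_lt hk3)
            rw [hmin]
            try simp [show ¬ k < o by omega, show k ≠ o by omega, h1, hfe,
                  pvFilt_nil_lt t k o hK hk3]
        · by_cases h2 : o = m
          · simp only [if_neg h1, beq_iff_eq, if_pos h2, ih, hK]
            try dsimp only
            have hfem : pvFilt (dep :: t) m = dep :: pvFilt t m := by
              rw [← h2]; exact hfe
            rcases lt_trichotomy k m with hk1 | hk2 | hk3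
            · have hmin : min o k = k := min_eq_right (by omega)
              rw [hmin]
              try simp [hk1, hfn k (by omega)]
            · have hmin : min o k = k := by rw [h2, hk2, min_self]
              rw [hmin, hk2]
              try simp [lt_irrefl, hfem, List.append_assoc]
            · have hmin : min o k = m := by rw [h2]; exact min_eq_left (le_of_lt hk3)
              rw [hmin]
              try simp [show ¬ k < m by omega, show k ≠ m by omega, lt_irrefl, hfem,
                    pvFilt_nil_lt t k m hK hk3]
          · simp only [if_neg h1, beq_iff_eq, if_neg h2, ih, hK]
            try dsimp only
            have hmo : m < o := by omega
            rcases lt_trichotomy k m with hk1 | hk2 | hk3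
            · have hmin : min o k = k := min_eq_right (by omega)
              rw [hmin]
              try simp [hk1, hfn k (by omega)]
            · have hmin : min o k = k := min_eq_right (by omega)
              rw [hmin, hk2]
              try simp [lt_irrefl, hfn m (by omega)]
            · have h4 : ¬ min o k < m := by
                rcases min_cases o k with ⟨h, _⟩ | ⟨h, _⟩ <;> omega
              have h5 : min o k ≠ m := by
                rcases min_cases o k with ⟨h, _⟩ | ⟨h, _⟩ <;> omega
              try simp [h4, h5, show ¬ k < m by omega, show k ≠ m by omega]

lemma pvLoop_none (l : List (List (String × List (String × Int))))
    (res : List (List (String × List (String × Int)))) :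
    l.foldl pvStep (none, res) =
      match pvOmin (l.filterMap pvOrd) with
      | none => (none, res)
      | some k => (some k, pvFilt l k) := by
  induction l generalizing res with
  | nil => rfl
  | cons dep t ih =>
    cases ho : pvAget (pvLp dep) "order" with
    | none =>
      have hord : pvOrd dep = none := ho
      have hstep : pvStep (none, res) dep = (none, res) := by simp [pvStep, ho]
      have hfm : (dep :: t).filterMap pvOrd = t.filterMap pvOrd := by
        try simp [hord]
      have hfk : ∀ v, pvFilt (dep :: t) v = pvFilt t v := by
        intro v
        have hc : (pvOrd dep == some v) = false := by simp [hord]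
        try simp [pvFilt, hc]
      rw [List.foldl_cons, hstep, ih, hfm]
      cases hK : pvOmin (t.filterMap pvOrd) with
      | none => rfl
      | some k => simp only [hfk]
    | some o =>
      have hord : pvOrd dep = some o := ho
      have hstep : pvStep (none, res) dep = (some o, [dep]) := by simp [pvStep, ho]
      have hfm : (dep :: t).filterMap pvOrd = o :: t.filterMap pvOrd := by
        try simp [hord]
      have hfe : pvFilt (dep :: t) o = dep :: pvFilt t o := by
        have hc : (pvOrd dep == some o) = true := by simp [hord]
        try simp [pvFilt, hc]
      have hfn : ∀ v, o ≠ v → pvFilt (dep :: t) v = pvFilt t v := by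
        intro v hv
        have hc : (pvOrd dep == some v) = false := by simp [hord]; exact hv
        try simp [pvFilt, hc]
      rw [List.foldl_cons, hstep, hfm, pvOmin_cons, pvLoop_some t o [dep]]
      cases hK : pvOmin (t.filterMap pvOrd) with
      | none =>
        try dsimp only
        try simp [hfe, pvFilt_nil_none t o hK]
      | some k =>
        try dsimp only
        rcases lt_trichotomy k o with hk1 | hk2 | hk3
        · have hmin : min o k = k := min_eq_right (le_of_lt hk1)
          rw [hmin]
          try simp [hk1, hfn k (by omega)]
        · have hmin : min o k = k := by rw [hk2, min_self]
          rw [hmin, hk2]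
          try simp [lt_irrefl, hfe]
        · have hmin : min o k = o := min_eq_left (le_of_lt hk3)
          rw [hmin]
          try simp [show ¬ k < o by omega, show k ≠ o by omega, hfe,
                pvFilt_nil_lt t k o hK hk3]

-- ===== VERDICT (by name: the statement is the Claim_ definition above) =====
theorem get_order_filtered_deployments_py_spec : Claim_equal_get_order_filtered_deployments_py := by
  intro hd _ _
  show get_order_filtered_deployments_py hd = get_order_filtered_deployments_py_alt hd
  rw [get_order_filtered_deployments_py, get_order_filtered_deployments_py_alt]
  rw [pvLoop_none hd []]
  rw [show hd.filterMap (fun dep => pvAget (pvLp dep) "order") = hd.filterMap pvOrd from rfl]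
  rw [pvMin?_eq_omin]
  cases hK : pvOmin (hd.filterMap pvOrd) with
  | none => rfl
  | some m =>
    show pvFilt hd m = pvFilt hd m
    rfl
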